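-- pv_equiv track=rewrite | github.com/ZLSRW/m6A-IIN | Data_analysis/Primary_and_secondary_structure_analysis/binding_region_loop_alternation/0.binding_region_loop_alternation.py | replace_parentheses_with_dots
-- ===== SOURCE A (Python) =====
-- def replace_parentheses_with_dots(dot_bracket: str, start: int, end: int) -> str:
--     dot_bracket_list = list(dot_bracket)
--
--     if start >= end or start < 0 or end >= len(dot_bracket_list):
--         raise ValueError("Invalid loop positions.")
--
--     stack = []
--     pairings = {}
--
--     for i, char in enumerate(dot_bracket_list):
--         if char == '(':
--             stack.append(i)
--         elif char == ')':
--             if stack: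
--                 opening_index = stack.pop()
--                 pairings[opening_index] = i
--                 pairings[i] = opening_index
--
--
--     for i in range(start, end + 1):
--         if i in pairings:
--             matching_index = pairings[i]
--             dot_bracket_list[i] = '.'
--             dot_bracket_list[matching_index] = '.'
--
--     i, j = start - 1, end + 1
--     while i >= 0 and j < len(dot_bracket_list):
--         if i in pairings and pairings[i] == j:
--             dot_bracket_list[i] = '.'
--             dot_bracket_list[j] = '.'
--             i -= 1
--             j += 1
--         else:
--             break
--
--     return "".join(dot_bracket_list)
-- ===== SOURCE B (Python) =====
-- def replace_parentheses_with_dots(dot_bracket: str, start: int, end: int) -> str: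
--     n = len(dot_bracket)
--     if start >= end or start < 0 or end >= n:
--         raise ValueError("Invalid loop positions.")
--
--     def match(i):
--         # Matching partner of position i under standard bracket matching, found by a
--         # depth scan over the ORIGINAL string (no stack, no pairings table): an '('
--         # scans forward, a ')' scans backward, depth +1 on its own kind, -1 on the
--         # other; the partner is where the depth first reaches 0.
--         c = dot_bracket[i]
--         if c == '(':
--             depth = 1
--             for j in range(i + 1, n):
--                 if dot_bracket[j] == '(':
--                     depth += 1
--                 elif dot_bracket[j] == ')':
--                     depth -= 1
--                     if depth == 0:
--                         return j
--             return None
--         if c == ')':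
--             depth = 1
--             for j in range(i - 1, -1, -1):
--                 if dot_bracket[j] == ')':
--                     depth += 1
--                 elif dot_bracket[j] == '(':
--                     depth -= 1
--                     if depth == 0:
--                         return j
--             return None
--         return None
--
--     out = list(dot_bracket)
--     for i in range(start, end + 1):
--         j = match(i)
--         if j is not None:
--             out[i] = '.'
--             out[j] = '.'
--
--     i, j = start - 1, end + 1
--     while i >= 0 and j < n and match(i) == j:
--         out[i] = '.'
--         out[j] = '.'
--         i -= 1
--         j += 1
--
--     return ''.join(out)
-- ===== Notes on version B (the rewrite author's own statement) =====
-- stated objective: alternative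
-- what changed: A precomputes a global stack-built pairings dict and mutates a char list through its loops; B builds no table at all: each queried position is resolved independently by a directional depth scan (forward for '(', backward for ')') over the original immutable string, dotting positions as found.
import Mathlib
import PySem

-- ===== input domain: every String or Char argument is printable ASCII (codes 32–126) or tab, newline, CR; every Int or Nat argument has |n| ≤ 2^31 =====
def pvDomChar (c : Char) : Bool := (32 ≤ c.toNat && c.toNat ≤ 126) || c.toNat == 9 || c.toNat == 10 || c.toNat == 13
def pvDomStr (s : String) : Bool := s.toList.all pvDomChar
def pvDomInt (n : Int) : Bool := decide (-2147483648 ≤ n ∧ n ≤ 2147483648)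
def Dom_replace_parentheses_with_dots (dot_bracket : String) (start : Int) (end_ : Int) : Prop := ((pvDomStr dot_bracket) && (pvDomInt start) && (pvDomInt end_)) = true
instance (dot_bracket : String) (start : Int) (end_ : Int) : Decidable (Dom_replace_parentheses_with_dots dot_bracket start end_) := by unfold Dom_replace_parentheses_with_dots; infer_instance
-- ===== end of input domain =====

-- B replaces A's stack-built global pairings dict and list mutation by table-free directional
-- depth scans on the original string: each queried position finds its partner independently.
-- A raises ValueError iff start >= end or start < 0 or end >= len(dot_bracket); Pre_ excludes exactly those inputs.

-- ===== PORT A =====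
-- stack/pairings pass: Python's stack (append/pop at the end) is held top-first here
def pvStepA (sd : List Int × PySem.Dict Int Int) (ic : Int × Char) : List Int × PySem.Dict Int Int :=
  if ic.2 = '(' then (ic.1 :: sd.1, sd.2)
  else if ic.2 = ')' then
    match sd.1 with
    | [] => sd
    | o :: rest => (rest, (sd.2.insert o ic.1).insert ic.1 o)
  else sd

-- the final while loop of A
def pvAExt (d : PySem.Dict Int Int) (n : Int) (i j : Int) (l : List Char) : List Char :=
  if h : 0 ≤ i ∧ j < n then
    if d.get? i = some j then
      pvAExt d n (i - 1) (j + 1) (PySem.List.pySetD (PySem.List.pySetD l i '.') j '.')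
    else l
  else l
termination_by (i + 1).toNat
decreasing_by
  have := h.1; omega

def replace_parentheses_with_dots (dot_bracket : String) (start : Int) (end_ : Int) : String :=
  let l := dot_bracket.toList
  if start ≥ end_ ∨ start < 0 ∨ end_ ≥ (l.length : Int) then ""  -- Python raises ValueError here (outside Pre_)
  else
    let pairings := ((PySem.List.enumerate l).foldl pvStepA ([], PySem.Dict.empty)).2
    let l1 := (PySem.List.pyRange start (end_ + 1) 1).foldl (fun acc i =>
      match pairings.get? i with
      | some m => PySem.List.pySetD (PySem.List.pySetD acc i '.') m '.'
      | none => acc) l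
    String.mk (pvAExt pairings (l.length : Int) (start - 1) (end_ + 1) l1)

-- ===== PORT B =====
-- B's forward depth scan (python: for j in range(i+1, n) with a depth counter)
def pvScanF (l : List Char) (j : Nat) (d : Int) : Option Int :=
  if hj : j < l.length then
    if l[j] = '(' then pvScanF l (j + 1) (d + 1)
    else if l[j] = ')' then
      if d - 1 = 0 then some (j : Int) else pvScanF l (j + 1) (d - 1)
    else pvScanF l (j + 1) d
  else none
termination_by l.length - j
decreasing_by all_goals omega

-- B's backward depth scan (python: for j in range(i-1, -1, -1)); argument is one past the scan start
def pvScanB (l : List Char) (j : Nat) (d : Int) : Option Int :=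
  match j with
  | 0 => none
  | k + 1 =>
    if l.getD k ' ' = ')' then pvScanB l k (d + 1)
    else if l.getD k ' ' = '(' then
      if d - 1 = 0 then some (k : Int) else pvScanB l k (d - 1)
    else pvScanB l k d

-- B's match(i) helper; callers always pass 0 ≤ i < len
def pvMatch (l : List Char) (i : Int) : Option Int :=
  if l.getD i.toNat ' ' = '(' then pvScanF l (i.toNat + 1) 1
  else if l.getD i.toNat ' ' = ')' then pvScanB l i.toNat 1
  else none

-- B's while loop
def pvBExtL (l : List Char) (n : Int) (i j : Int) (out : List Char) : List Char :=
  if h : 0 ≤ i ∧ j < n ∧ pvMatch l i = some j then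
    pvBExtL l n (i - 1) (j + 1) (PySem.List.pySetD (PySem.List.pySetD out i '.') j '.')
  else out
termination_by (i + 1).toNat
decreasing_by
  have := h.1; omega

def replace_parentheses_with_dots_alt (dot_bracket : String) (start : Int) (end_ : Int) : String :=
  let l := dot_bracket.toList
  if start ≥ end_ ∨ start < 0 ∨ end_ ≥ (l.length : Int) then ""  -- B raises ValueError here (outside Pre_)
  else
    let out := (PySem.List.pyRange start (end_ + 1) 1).foldl (fun acc i =>
      match pvMatch l i with
      | some j => PySem.List.pySetD (PySem.List.pySetD acc i '.') j '.'
      | none => acc) l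
    String.mk (pvBExtL l (l.length : Int) (start - 1) (end_ + 1) out)

-- ===== PRECONDITION & SPEC =====
-- exactly the inputs on which A returns normally (otherwise it raises ValueError)
def Pre_replace_parentheses_with_dots (dot_bracket : String) (start : Int) (end_ : Int) : Prop :=
  0 ≤ start ∧ start < end_ ∧ end_ < (dot_bracket.toList.length : Int)
instance (dot_bracket : String) (start : Int) (end_ : Int) : Decidable (Pre_replace_parentheses_with_dots dot_bracket start end_) := by unfold Pre_replace_parentheses_with_dots; infer_instance

def pvWitness_replace_parentheses_with_dots : String × Int × Int := ("((.))", 1, 3)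

def Spec_replace_parentheses_with_dots (dot_bracket : String) (start : Int) (end_ : Int) (out : String) : Prop := out = replace_parentheses_with_dots_alt dot_bracket start end_
instance (dot_bracket : String) (start : Int) (end_ : Int) (out : String) : Decidable (Spec_replace_parentheses_with_dots dot_bracket start end_ out) := by unfold Spec_replace_parentheses_with_dots; infer_instance

-- ===== CLAIM (what is proved, stated in full; the proofs are below) =====
def Claim_equal_replace_parentheses_with_dots : Prop := ∀ (dot_bracket : String) (start : Int) (end_ : Int), Dom_replace_parentheses_with_dots dot_bracket start end_ → Pre_replace_parentheses_with_dots dot_bracket start end_ → Spec_replace_parentheses_with_dots dot_bracket start end_ (replace_parentheses_with_dots dot_bracket start end_)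

-- ===== LEMMAS AND PROOFS =====

-- ghost stack pass (proof-side model of A's dict as an ordered pair list)
def pvStepB (ps : List (Int × Int) × List Int) (ic : Int × Char) : List (Int × Int) × List Int :=
  if ic.2 = '(' then (ps.1, ic.1 :: ps.2)
  else if ic.2 = ')' then
    match ps.2 with
    | [] => ps
    | o :: rest => (ps.1 ++ [(o, ic.1)], rest)
  else ps

-- symmetric first-match lookup in a pair list (proof-side model of A's dict)
def pvLookup2 (prs : List (Int × Int)) (x : Int) : Option Int :=
  match prs with
  | [] => none
  | pq :: t => if x = pq.1 then some pq.2 else if x = pq.2 then some pq.1 else pvLookup2 t x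

def pvIdxs (prs : List (Int × Int)) : List Int := prs.flatMap (fun pq => [pq.1, pq.2])

-- invariant of the two pairing folds
def pvInv (k : Int) (st : List Int) (prs : List (Int × Int)) (d : PySem.Dict Int Int) : Prop :=
  0 ≤ k ∧
  (∀ x ∈ st, 0 ≤ x ∧ x < k) ∧
  (∀ pq ∈ prs, 0 ≤ pq.1 ∧ pq.1 < pq.2 ∧ pq.2 < k) ∧
  (st ++ pvIdxs prs).Nodup ∧
  (∀ x, d.get? x = pvLookup2 prs x)

theorem pv_mem_pvIdxs (t : List (Int × Int)) (a b : Int) (h : (a, b) ∈ t) :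
    a ∈ pvIdxs t ∧ b ∈ pvIdxs t := by
  constructor <;> · simp only [pvIdxs, List.mem_flatMap]
                    exact ⟨(a, b), h, by simp⟩

theorem pvIdxs_cons (hd : Int × Int) (t : List (Int × Int)) :
    pvIdxs (hd :: t) = hd.1 :: hd.2 :: pvIdxs t := by
  simp [pvIdxs]

theorem pvLookup2_append (prs : List (Int × Int)) (pq : Int × Int) (x : Int) :
    pvLookup2 (prs ++ [pq]) x = match pvLookup2 prs x with
      | some y => some y
      | none => if x = pq.1 then some pq.2 else if x = pq.2 then some pq.1 else none := by
  induction prs with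
  | nil => simp [pvLookup2]
  | cons h t ih =>
      simp only [List.cons_append, pvLookup2]
      split_ifs with h1 h2 <;> simp only [ih] <;> rcases hlk : pvLookup2 t x with _ | y <;> simp_all

theorem pvLookup2_eq_none (prs : List (Int × Int)) (x : Int) (h : x ∉ pvIdxs prs) :
    pvLookup2 prs x = none := by
  induction prs with
  | nil => rfl
  | cons hd t ih =>
      rw [pvIdxs_cons] at h
      simp only [List.mem_cons, not_or] at h
      simp only [pvLookup2, if_neg h.1, if_neg h.2.1]
      exact ih h.2.2

theorem pvLookup2_of_mem (prs : List (Int × Int)) (a b : Int) (hn : (pvIdxs prs).Nodup)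
    (h : (a, b) ∈ prs) : pvLookup2 prs a = some b ∧ pvLookup2 prs b = some a := by
  induction prs with
  | nil => simp at h
  | cons hd t ih =>
      rw [pvIdxs_cons] at hn
      simp only [List.nodup_cons, List.mem_cons, not_or] at hn
      rcases List.mem_cons.mp h with he | ht
      · subst he
        refine ⟨by simp [pvLookup2], ?_⟩
        have hne : b ≠ a := fun hba => hn.1.1 hba.symm
        simp [pvLookup2, hne]
      · have hmem := pv_mem_pvIdxs t a b ht
        have ha1 : a ≠ hd.1 := fun he' => hn.1.2 (he' ▸ hmem.1)
        have ha2 : a ≠ hd.2 := fun he' => hn.2.1 (he' ▸ hmem.1)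
        have hb1 : b ≠ hd.1 := fun he' => hn.1.2 (he' ▸ hmem.2)
        have hb2 : b ≠ hd.2 := fun he' => hn.2.1 (he' ▸ hmem.2)
        have := ih hn.2.2 ht
        simp only [pvLookup2, if_neg ha1, if_neg ha2, if_neg hb1, if_neg hb2]
        exact this

theorem pvIdxs_append (prs : List (Int × Int)) (pq : Int × Int) :
    pvIdxs (prs ++ [pq]) = pvIdxs prs ++ [pq.1, pq.2] := by
  simp [pvIdxs]

theorem pvIdxs_mem_bound (prs : List (Int × Int)) (k : Int)
    (hprs : ∀ pq ∈ prs, 0 ≤ pq.1 ∧ pq.1 < pq.2 ∧ pq.2 < k) :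
    ∀ x ∈ pvIdxs prs, 0 ≤ x ∧ x < k := by
  intro x hx
  simp only [pvIdxs, List.mem_flatMap] at hx
  obtain ⟨pq, hpq, hx⟩ := hx
  have := hprs pq hpq
  simp at hx
  rcases hx with rfl | rfl <;> omega

theorem pvInv_mono (k k' : Int) (st : List Int) (prs : List (Int × Int))
    (d : PySem.Dict Int Int) (h : pvInv k st prs d) (hk : k ≤ k') : pvInv k' st prs d := by
  obtain ⟨h0, h1, h2, h3, h4⟩ := h
  refine ⟨by omega, fun x hx => ?_, fun pq hpq => ?_, h3, h4⟩
  · have := h1 x hx; omega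
  · have := h2 pq hpq; omega

-- the real fold (A's dict) and the ghost fold run in lockstep and preserve pvInv
theorem pvFold_inv (l : List Char) : ∀ (k : Int) (st : List Int) (prs : List (Int × Int))
    (d : PySem.Dict Int Int), pvInv k st prs d →
    ((PySem.List.enumerate l k).foldl pvStepA (st, d)).1 = ((PySem.List.enumerate l k).foldl pvStepB (prs, st)).2 ∧
    pvInv (k + l.length) ((PySem.List.enumerate l k).foldl pvStepB (prs, st)).2
      ((PySem.List.enumerate l k).foldl pvStepB (prs, st)).1
      ((PySem.List.enumerate l k).foldl pvStepA (st, d)).2 := by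
  induction l with
  | nil =>
      intro k st prs d hinv
      simpa [PySem.List.enumerate_nil] using hinv
  | cons c t ih =>
      intro k st prs d hinv
      obtain ⟨h0, h1, h2, h3, h4⟩ := hinv
      rw [PySem.List.enumerate_cons]
      simp only [List.foldl_cons, List.length_cons]
      have harith : (k + 1) + (t.length : Int) = k + ((t.length : Int) + 1) := by ring
      by_cases hc1 : c = '('
      · have hA : pvStepA (st, d) (k, c) = (k :: st, d) := by simp [pvStepA, hc1]
        have hB : pvStepB (prs, st) (k, c) = (prs, k :: st) := by simp [pvStepB, hc1]
        rw [hA, hB]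
        have hinv' : pvInv (k + 1) (k :: st) prs d := by
          refine ⟨by omega, ?_, ?_, ?_, h4⟩
          · intro x hx
            rcases List.mem_cons.mp hx with rfl | hx
            · omega
            · have := h1 x hx; omega
          · intro pq hpq; have := h2 pq hpq; omega
          · rw [List.cons_append, List.nodup_cons]
            refine ⟨?_, h3⟩
            intro hk
            rcases List.mem_append.mp hk with hk | hk
            · have := h1 k hk; omega
            · have := pvIdxs_mem_bound prs k h2 k hk; omega
        have := ih (k + 1) (k :: st) prs d hinv'
        rw [harith] at this
        push_cast
        exact this
      · by_cases hc2 : c = ')'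
        · cases hst : st with
          | nil =>
              subst hst
              have hA : pvStepA (([] : List Int), d) (k, c) = ([], d) := by
                simp [pvStepA, hc1, hc2]
              have hB : pvStepB (prs, ([] : List Int)) (k, c) = (prs, []) := by
                simp [pvStepB, hc1, hc2]
              rw [hA, hB]
              have := ih (k + 1) [] prs d (pvInv_mono _ _ _ _ _ ⟨h0, h1, h2, h3, h4⟩ (by omega))
              rw [harith] at this
              push_cast
              exact this
          | cons o rest =>
              subst hst
              have ho := h1 o List.mem_cons_self
              have hA : pvStepA (o :: rest, d) (k, c) = (rest, (d.insert o k).insert k o) := by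
                simp [pvStepA, hc1, hc2]
              have hB : pvStepB (prs, o :: rest) (k, c) = (prs ++ [(o, k)], rest) := by
                simp [pvStepB, hc1, hc2]
              rw [hA, hB]
              rw [List.cons_append, List.nodup_cons] at h3
              have hkfresh : ∀ x ∈ pvIdxs prs, 0 ≤ x ∧ x < k := pvIdxs_mem_bound prs k h2
              have hinv' : pvInv (k + 1) rest (prs ++ [(o, k)]) ((d.insert o k).insert k o) := by
                refine ⟨by omega, ?_, ?_, ?_, ?_⟩
                · intro x hx
                  have := h1 x (List.mem_cons_of_mem _ hx); omega
                · intro pq hpq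
                  rcases List.mem_append.mp hpq with hpq | hpq
                  · have := h2 pq hpq; omega
                  · simp at hpq; subst hpq; simp; omega
                · rw [pvIdxs_append]
                  show (rest ++ (pvIdxs prs ++ [o, k])).Nodup
                  have hperm : (rest ++ (pvIdxs prs ++ [o, k])).Perm
                      (k :: o :: (rest ++ pvIdxs prs)) := by
                    have p1 : ((rest ++ pvIdxs prs) ++ [o, k] : List Int).Perm
                        ([o, k] ++ (rest ++ pvIdxs prs)) := List.perm_append_comm
                    have p2 : ([o, k] ++ (rest ++ pvIdxs prs) : List Int).Perm
                        (k :: o :: (rest ++ pvIdxs prs)) := List.Perm.swap k o _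
                    rw [← List.append_assoc]
                    exact p1.trans p2
                  rw [hperm.nodup_iff]
                  rw [List.nodup_cons, List.nodup_cons]
                  refine ⟨?_, ?_, h3.2⟩
                  · intro hk
                    rcases List.mem_cons.mp hk with rfl | hk
                    · omega
                    · rcases List.mem_append.mp hk with hk | hk
                      · have := h1 k (List.mem_cons_of_mem _ hk); omega
                      · have := hkfresh k hk; omega
                  · exact h3.1
                · intro x
                  have hko : ¬ (k = o) := by omega
                  have hlkk : pvLookup2 prs k = none :=
                    pvLookup2_eq_none prs k (fun hk => by have := hkfresh k hk; omega)
                  have hlko : pvLookup2 prs o = none :=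
                    pvLookup2_eq_none prs o (fun hk => h3.1 (List.mem_append.mpr (Or.inr hk)))
                  rw [pvLookup2_append]
                  rw [PySem.Dict.get?_insert, PySem.Dict.get?_insert]
                  by_cases hx1 : x = k
                  · subst hx1; simp [hlkk, hko]
                  · by_cases hx2 : x = o
                    · subst hx2; simp [hx1, hlko]
                    · simp only [if_neg hx1, if_neg hx2, h4 x]
                      rcases hv : pvLookup2 prs x with _ | y
                      · simp
                      · rfl
              have := ih (k + 1) rest (prs ++ [(o, k)]) ((d.insert o k).insert k o) hinv'
              rw [harith] at this
              push_cast
              exact this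
        · have hA : pvStepA (st, d) (k, c) = (st, d) := by simp [pvStepA, hc1, hc2]
          have hB : pvStepB (prs, st) (k, c) = (prs, st) := by simp [pvStepB, hc1, hc2]
          rw [hA, hB]
          have := ih (k + 1) st prs d (pvInv_mono _ _ _ _ _ ⟨h0, h1, h2, h3, h4⟩ (by omega))
          rw [harith] at this
          push_cast
          exact this

-- ========== depth-scan machinery ==========

-- running paren balance of the prefix of length k
def pvDelta (c : Char) : Int := if c = '(' then 1 else if c = ')' then -1 else 0

def pvF (l : List Char) (k : Nat) : Int :=
  (l.take k).foldl (fun d c => if c = '(' then d + 1 else if c = ')' then d - 1 else d) 0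

theorem pvF_succ (l : List Char) (k : Nat) :
    pvF l (k + 1) = pvF l k + pvDelta (l.getD k ' ') := by
  by_cases hk : k < l.length
  · have hg : l[k]? = some l[k] := List.getElem?_eq_getElem hk
    rw [pvF, List.take_succ, hg, List.getD_eq_getElem?_getD, hg]
    simp only [Option.toList_some, List.foldl_append, List.foldl_cons, List.foldl_nil,
      Option.getD_some]
    rw [pvF, pvDelta]
    split_ifs <;> ring
  · have h1 : l.take (k + 1) = l.take k := by
      rw [List.take_of_length_le (by omega), List.take_of_length_le (by omega)]
    have h2 : l.getD k ' ' = ' ' := by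
      rw [List.getD_eq_getElem?_getD, List.getElem?_eq_none (by omega)]; rfl
    rw [pvF, h1, h2, ← pvF, pvDelta]
    simp

-- scan characterisations (the sufficient directions)
theorem pvScanF_none_of (l : List Char) : ∀ (fuel j : Nat) (d : Int), l.length ≤ j + fuel → 1 ≤ d →
    (∀ p : Nat, j ≤ p → p < l.length → d + pvF l (p + 1) - pvF l j > 0) →
    pvScanF l j d = none := by
  intro fuel
  induction fuel with
  | zero =>
      intro j d hfe _ _
      rw [pvScanF, dif_neg (by omega)]
  | succ f ih =>
      intro j d hfe hd h
      rw [pvScanF]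
      by_cases hj : j < l.length
      · rw [dif_pos hj]
        have hget : l.getD j ' ' = l[j] := by
          rw [List.getD_eq_getElem?_getD, List.getElem?_eq_getElem hj]; rfl
        have hF := pvF_succ l j
        rw [hget] at hF
        by_cases h1 : l[j] = '('
        · rw [if_pos h1]
          rw [h1] at hF; simp [pvDelta] at hF
          exact ih (j + 1) (d + 1) (by omega) (by omega)
            (fun p hp hpl => by have := h p (by omega) hpl; omega)
        · by_cases h2 : l[j] = ')'
          · rw [if_neg h1, if_pos h2]
            rw [h2] at hF; simp [pvDelta] at hF
            have hj' := h j le_rfl hj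
            rw [if_neg (by omega)]
            exact ih (j + 1) (d - 1) (by omega) (by omega)
              (fun p hp hpl => by have := h p (by omega) hpl; omega)
          · rw [if_neg h1, if_neg h2]
            have hδ : pvDelta l[j] = 0 := by unfold pvDelta; rw [if_neg h1, if_neg h2]
            rw [hδ] at hF
            exact ih (j + 1) d (by omega) hd
              (fun p hp hpl => by have := h p (by omega) hpl; omega)
      · rw [dif_neg hj]

theorem pvScanF_some_of (l : List Char) : ∀ (fuel j : Nat) (d : Int) (m : Nat), l.length ≤ j + fuel → 1 ≤ d →
    j ≤ m → m < l.length → d + pvF l (m + 1) - pvF l j = 0 →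
    (∀ p : Nat, j ≤ p → p < m → d + pvF l (p + 1) - pvF l j > 0) →
    pvScanF l j d = some (m : Int) := by
  intro fuel
  induction fuel with
  | zero =>
      intro j d m hfe _ hjm hm _ _
      omega
  | succ f ih =>
      intro j d m hfe hd hjm hm heq hpos
      have hj : j < l.length := by omega
      rw [pvScanF, dif_pos hj]
      have hget : l.getD j ' ' = l[j] := by
        rw [List.getD_eq_getElem?_getD, List.getElem?_eq_getElem hj]; rfl
      have hF := pvF_succ l j
      rw [hget] at hF
      by_cases h1 : l[j] = '('
      · rw [if_pos h1]
        rw [h1] at hF; simp [pvDelta] at hF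
        have hne : j ≠ m := by
          intro e; subst e; omega
        exact ih (j + 1) (d + 1) m (by omega) (by omega) (by omega) hm (by omega)
          (fun p hp hpm => by have := hpos p (by omega) hpm; omega)
      · by_cases h2 : l[j] = ')'
        · rw [if_neg h1, if_pos h2]
          rw [h2] at hF; simp [pvDelta] at hF
          by_cases hdm : d - 1 = 0
          · rw [if_pos hdm]
            have hjem : j = m := by
              by_contra hne
              have := hpos j le_rfl (by omega)
              omega
            rw [hjem]
          · rw [if_neg hdm]
            have hne : j ≠ m := by intro e; subst e; omega
            exact ih (j + 1) (d - 1) m (by omega) (by omega) (by omega) hm (by omega)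
              (fun p hp hpm => by have := hpos p (by omega) hpm; omega)
        · rw [if_neg h1, if_neg h2]
          have hδ : pvDelta l[j] = 0 := by unfold pvDelta; rw [if_neg h1, if_neg h2]
          rw [hδ] at hF
          have hne : j ≠ m := by intro e; subst e; omega
          exact ih (j + 1) d m (by omega) hd (by omega) hm (by omega)
            (fun p hp hpm => by have := hpos p (by omega) hpm; omega)

theorem pvScanB_none_of (l : List Char) : ∀ (j : Nat) (d : Int), 1 ≤ d →
    (∀ p : Nat, p < j → d + pvF l p - pvF l j > 0) →
    pvScanB l j d = none := by
  intro j
  induction j with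
  | zero => intro d _ _; rfl
  | succ k ih =>
      intro d hd h
      have hF := pvF_succ l k
      rw [pvScanB]
      by_cases h1 : l.getD k ' ' = ')'
      · rw [if_pos h1]
        rw [h1] at hF; simp [pvDelta] at hF
        exact ih (d + 1) (by omega) (fun p hp => by have := h p (by omega); omega)
      · by_cases h2 : l.getD k ' ' = '('
        · rw [if_neg h1, if_pos h2]
          rw [h2] at hF; simp [pvDelta] at hF
          have hk := h k (by omega)
          rw [if_neg (by omega)]
          exact ih (d - 1) (by omega) (fun p hp => by have := h p (by omega); omega)
        · rw [if_neg h1, if_neg h2]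
          have hδ : pvDelta (l.getD k ' ') = 0 := by unfold pvDelta; rw [if_neg h2, if_neg h1]
          rw [hδ] at hF
          exact ih d hd (fun p hp => by have := h p (by omega); omega)

theorem pvScanB_some_of (l : List Char) : ∀ (j : Nat) (d : Int) (q : Nat), 1 ≤ d →
    q < j → d + pvF l q - pvF l j = 0 →
    (∀ p : Nat, q < p → p < j → d + pvF l p - pvF l j > 0) →
    pvScanB l j d = some (q : Int) := by
  intro j
  induction j with
  | zero => intro d q _ hq _ _; omega
  | succ k ih =>
      intro d q hd hq heq hpos
      have hF := pvF_succ l k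
      rw [pvScanB]
      by_cases h1 : l.getD k ' ' = ')'
      · rw [if_pos h1]
        rw [h1] at hF; simp [pvDelta] at hF
        have hqk : q ≠ k := by intro e; subst e; omega
        exact ih (d + 1) q (by omega) (by omega) (by omega)
          (fun p hp hpk => by have := hpos p hp (by omega); omega)
      · by_cases h2 : l.getD k ' ' = '('
        · rw [if_neg h1, if_pos h2]
          rw [h2] at hF; simp [pvDelta] at hF
          by_cases hqk : q = k
          · subst hqk
            rw [if_pos (by omega)]
          · have := hpos k (by omega) (by omega)
            rw [if_neg (by omega)]
            exact ih (d - 1) q (by omega) (by omega) (by omega)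
              (fun p hp hpk => by have := hpos p hp (by omega); omega)
        · rw [if_neg h1, if_neg h2]
          have hδ : pvDelta (l.getD k ' ') = 0 := by unfold pvDelta; rw [if_neg h2, if_neg h1]
          rw [hδ] at hF
          have hqk : q ≠ k := by intro e; subst e; omega
          exact ih d q hd (by omega) (by omega)
            (fun p hp hpk => by have := hpos p hp (by omega); omega)

-- counting helpers over the ghost stack
def pvCntGT (st : List Int) (s : Int) : Int := ((st.filter (fun s' => decide (s < s'))).length : Int)
def pvCntGE (st : List Int) (q : Int) : Int := ((st.filter (fun s' => decide (q ≤ s'))).length : Int)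

theorem pvCntGT_nonneg (st : List Int) (s : Int) : 0 ≤ pvCntGT st s := Int.natCast_nonneg _
theorem pvCntGE_nonneg (st : List Int) (q : Int) : 0 ≤ pvCntGE st q := Int.natCast_nonneg _

theorem pvCntGT_cons (a : Int) (st : List Int) (s : Int) :
    pvCntGT (a :: st) s = (if s < a then 1 else 0) + pvCntGT st s := by
  by_cases h : s < a <;> simp [pvCntGT, List.filter_cons, h] <;> push_cast <;> ring

theorem pvCntGE_cons (a : Int) (st : List Int) (q : Int) :
    pvCntGE (a :: st) q = (if q ≤ a then 1 else 0) + pvCntGE st q := by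
  by_cases h : q ≤ a <;> simp [pvCntGE, List.filter_cons, h] <;> push_cast <;> ring

theorem pvCntGT_eq_zero (st : List Int) (s : Int) (h : ∀ x ∈ st, ¬ s < x) :
    pvCntGT st s = 0 := by
  rw [pvCntGT, List.filter_eq_nil_iff.mpr (by simpa using h)]
  rfl

-- everything the final scan needs about a matched pair
def pvPairGood (l : List Char) (pq : Int × Int) : Prop :=
  0 ≤ pq.1 ∧ pq.1 < pq.2 ∧ pq.2 < (l.length : Int) ∧
  l.getD pq.1.toNat ' ' = '(' ∧ l.getD pq.2.toNat ' ' = ')' ∧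
  pvF l (pq.2.toNat + 1) - pvF l (pq.1.toNat + 1) = -1 ∧
  ∀ p : Nat, pq.1.toNat + 1 ≤ p → p < pq.2.toNat → 1 + pvF l (p + 1) - pvF l (pq.1.toNat + 1) > 0

-- invariant of the ghost fold that drives the depth-scan correspondence
def pvInvScan (l : List Char) (k : Nat) (prs : List (Int × Int)) (st : List Int) : Prop :=
  List.Pairwise (fun a b => b < a) st ∧
  (∀ s ∈ st, 0 ≤ s ∧ s < (k : Int) ∧ l.getD s.toNat ' ' = '(' ∧
    1 + pvF l k - pvF l (s.toNat + 1) = 1 + pvCntGT st s ∧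
    ∀ p : Nat, s.toNat + 1 ≤ p → p < k → 1 + pvF l (p + 1) - pvF l (s.toNat + 1) > 0) ∧
  (∀ pq ∈ prs, pvPairGood l pq) ∧
  (∀ q : Nat, q ≤ k → pvF l k - pvF l q ≤ pvCntGE st (q : Int)) ∧
  (∀ p : Nat, p < k → l.getD p ' ' = '(' → ((p : Int) ∈ st ∨ ∃ b, ((p : Int), b) ∈ prs)) ∧
  (∀ p : Nat, p < k → l.getD p ' ' = ')' →
    ((∃ a, (a, (p : Int)) ∈ prs) ∨ ∀ q : Nat, q ≤ p → pvF l p - pvF l q ≤ 0))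

theorem pvScanFold (l : List Char) : ∀ (t : List Char) (k : Nat) (prs : List (Int × Int)) (st : List Int),
    l.drop k = t → pvInvScan l k prs st →
    pvInvScan l (k + t.length)
      (((PySem.List.enumerate t (k : Int)).foldl pvStepB (prs, st)).1)
      (((PySem.List.enumerate t (k : Int)).foldl pvStepB (prs, st)).2) := by
  intro t
  induction t with
  | nil =>
      intro k prs st _ h
      simpa [PySem.List.enumerate_nil] using h
  | cons c t ih =>
      intro k prs st hdrop hinv
      have hk : k < l.length := by
        by_contra h
        rw [List.drop_eq_nil_of_le (by omega)] at hdrop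
        cases hdrop
      have hgk : l[k]? = some c := by
        have h0 : (l.drop k)[0]? = some c := by rw [hdrop]; rfl
        rw [List.getElem?_drop] at h0
        simpa using h0
      have hck : l.getD k ' ' = c := by
        rw [List.getD_eq_getElem?_getD, hgk]; rfl
      have hdrop' : l.drop (k + 1) = t := by
        rw [← List.tail_drop, hdrop]
        rfl
      have hF : pvF l (k + 1) = pvF l k + pvDelta c := by rw [pvF_succ, hck]
      rw [PySem.List.enumerate_cons]
      simp only [List.foldl_cons]
      have hcast : (k : Int) + 1 = ((k + 1 : Nat) : Int) := by push_cast; ring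
      have hlen : k + (c :: t).length = (k + 1) + t.length := by simp [List.length_cons]; omega
      rw [hlen]
      obtain ⟨hPW, hST, hPR, hI6, hCov1, hCov2⟩ := hinv
      by_cases hc1 : c = '('
      · have hB : pvStepB (prs, st) ((k : Int), c) = (prs, (k : Int) :: st) := by
          simp [pvStepB, hc1]
        rw [hB, hcast]
        apply ih (k + 1) prs ((k : Int) :: st) hdrop'
        have hδ : pvDelta c = 1 := by simp [pvDelta, hc1]
        rw [hδ] at hF
        refine ⟨?_, ?_, hPR, ?_, ?_, ?_⟩
        · rw [List.pairwise_cons]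
          exact ⟨fun b hb => (hST b hb).2.1, hPW⟩
        · intro s hs
          rcases List.mem_cons.mp hs with rfl | hs'
          · refine ⟨Int.natCast_nonneg k, by push_cast; omega, ?_, ?_, ?_⟩
            · rw [Int.toNat_natCast, hck, hc1]
            · rw [Int.toNat_natCast]
              have h0 : pvCntGT ((k : Int) :: st) (k : Int) = 0 := by
                apply pvCntGT_eq_zero
                intro x hx
                rcases List.mem_cons.mp hx with rfl | hx'
                · omega
                · have := (hST x hx').2.1; omega
              omega
            · intro p hp1 hp2
              rw [Int.toNat_natCast] at hp1
              omega
          · obtain ⟨hs0, hs1, hs2, hs3, hs4⟩ := hST s hs'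
            refine ⟨hs0, by omega, hs2, ?_, ?_⟩
            · have hcnt := pvCntGT_cons (k : Int) st s
              rw [if_pos hs1] at hcnt
              omega
            · intro p hp hpk1
              by_cases hpk : p < k
              · exact hs4 p hp hpk
              · have hpe : p = k := by omega
                subst hpe
                have := pvCntGT_nonneg st s
                omega
        · intro q hq
          by_cases hqk : q ≤ k
          · have h6 := hI6 q hqk
            have hcnt := pvCntGE_cons (k : Int) st (q : Int)
            rw [if_pos (by exact_mod_cast hqk)] at hcnt
            omega
          · have hqe : q = k + 1 := by omega
            subst hqe
            have := pvCntGE_nonneg ((k : Int) :: st) ((k + 1 : Nat) : Int)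
            omega
        · intro p hp hchar
          by_cases hpk : p < k
          · rcases hCov1 p hpk hchar with h | h
            · exact Or.inl (List.mem_cons_of_mem _ h)
            · exact Or.inr h
          · have hpe : p = k := by omega
            subst hpe
            exact Or.inl List.mem_cons_self
        · intro p hp hchar
          by_cases hpk : p < k
          · exact hCov2 p hpk hchar
          · have hpe : p = k := by omega
            subst hpe
            rw [hck, hc1] at hchar
            cases hchar
      · by_cases hc2 : c = ')'
        · have hδ : pvDelta c = -1 := by simp [pvDelta, hc1, hc2]
          rw [hδ] at hF
          cases hst : st with
          | nil =>
              subst hst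
              have hB : pvStepB (prs, ([] : List Int)) ((k : Int), c) = (prs, []) := by
                simp [pvStepB, hc1, hc2]
              rw [hB, hcast]
              apply ih (k + 1) prs [] hdrop'
              have hE : ∀ q : Nat, q ≤ k → pvF l k - pvF l q ≤ 0 := by
                intro q hq
                have := hI6 q hq
                simpa [pvCntGE] using this
              refine ⟨List.Pairwise.nil, by simp, hPR, ?_, ?_, ?_⟩
              · intro q hq
                by_cases hqk : q ≤ k
                · have := hE q hqk
                  simp only [pvCntGE, List.filter_nil, List.length_nil, Nat.cast_zero]
                  omega
                · have hqe : q = k + 1 := by omega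
                  subst hqe
                  simp [pvCntGE]
              · intro p hp hchar
                by_cases hpk : p < k
                · rcases hCov1 p hpk hchar with h | h
                  · cases h
                  · exact Or.inr h
                · have hpe : p = k := by omega
                  subst hpe
                  rw [hck, hc2] at hchar
                  cases hchar
              · intro p hp hchar
                by_cases hpk : p < k
                · exact hCov2 p hpk hchar
                · have hpe : p = k := by omega
                  subst hpe
                  exact Or.inr hE
          | cons o rest =>
              subst hst
              have hB : pvStepB (prs, o :: rest) ((k : Int), c) = (prs ++ [(o, (k : Int))], rest) := by
                simp [pvStepB, hc1, hc2]
              rw [hB, hcast]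
              apply ih (k + 1) (prs ++ [(o, (k : Int))]) rest hdrop'
              obtain ⟨ho0, ho1, ho2, ho3, ho4⟩ := hST o List.mem_cons_self
              rw [List.pairwise_cons] at hPW
              obtain ⟨hrlt, hPW'⟩ := hPW
              have hcnt0 : pvCntGT (o :: rest) o = 0 := by
                apply pvCntGT_eq_zero
                intro x hx
                rcases List.mem_cons.mp hx with rfl | hx'
                · omega
                · have := hrlt x hx'; omega
              have hFko : pvF l k = pvF l (o.toNat + 1) := by omega
              have hgood : pvPairGood l (o, (k : Int)) := by
                have c5 : l.getD ((k : Int)).toNat ' ' = ')' := by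
                  rw [Int.toNat_natCast, hck, hc2]
                have c6 : pvF l (((k : Int)).toNat + 1) - pvF l (o.toNat + 1) = -1 := by
                  rw [Int.toNat_natCast]; omega
                have c7 : ∀ p : Nat, o.toNat + 1 ≤ p → p < ((k : Int)).toNat →
                    1 + pvF l (p + 1) - pvF l (o.toNat + 1) > 0 := by
                  intro p hp1 hp2
                  rw [Int.toNat_natCast] at hp2
                  exact ho4 p hp1 hp2
                exact ⟨ho0, ho1, by push_cast; omega, ho2, c5, c6, c7⟩
              refine ⟨hPW', ?_, ?_, ?_, ?_, ?_⟩
              · intro s hs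
                obtain ⟨hs0, hs1, hs2, hs3, hs4⟩ := hST s (List.mem_cons_of_mem _ hs)
                have hso : s < o := hrlt s hs
                refine ⟨hs0, by omega, hs2, ?_, ?_⟩
                · have hcnt := pvCntGT_cons o rest s
                  rw [if_pos hso] at hcnt
                  omega
                · intro p hp hpk1
                  by_cases hpk : p < k
                  · exact hs4 p hp hpk
                  · have hpe : p = k := by omega
                    subst hpe
                    have hcnt := pvCntGT_cons o rest s
                    rw [if_pos hso] at hcnt
                    have := pvCntGT_nonneg rest s
                    omega
              · intro pq hpq
                rcases List.mem_append.mp hpq with h | h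
                · exact hPR pq h
                · simp only [List.mem_singleton] at h
                  subst h
                  exact hgood
              · intro q hq
                by_cases hqk : q ≤ k
                · have h6 := hI6 q hqk
                  have hcnt := pvCntGE_cons o rest (q : Int)
                  by_cases hqo : (q : Int) ≤ o
                  · rw [if_pos hqo] at hcnt; omega
                  · rw [if_neg hqo] at hcnt; omega
                · have hqe : q = k + 1 := by omega
                  subst hqe
                  have := pvCntGE_nonneg rest ((k + 1 : Nat) : Int)
                  omega
              · intro p hp hchar
                by_cases hpk : p < k
                · rcases hCov1 p hpk hchar with h | h
                  · rcases List.mem_cons.mp h with he | h'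
                    · exact Or.inr ⟨(k : Int), by rw [he]; exact List.mem_append_right _ (List.mem_singleton.mpr rfl)⟩
                    · exact Or.inl h'
                  · obtain ⟨b, hb⟩ := h
                    exact Or.inr ⟨b, List.mem_append_left _ hb⟩
                · have hpe : p = k := by omega
                  subst hpe
                  rw [hck, hc2] at hchar
                  cases hchar
              · intro p hp hchar
                by_cases hpk : p < k
                · rcases hCov2 p hpk hchar with h | h
                  · obtain ⟨a, ha⟩ := h
                    exact Or.inl ⟨a, List.mem_append_left _ ha⟩
                  · exact Or.inr h
                · have hpe : p = k := by omega
                  subst hpe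
                  exact Or.inl ⟨o, List.mem_append_right _ (List.mem_singleton.mpr rfl)⟩
        · have hδ : pvDelta c = 0 := by simp [pvDelta, hc1, hc2]
          rw [hδ] at hF
          have hB : pvStepB (prs, st) ((k : Int), c) = (prs, st) := by
            simp [pvStepB, hc1, hc2]
          rw [hB, hcast]
          apply ih (k + 1) prs st hdrop'
          refine ⟨hPW, ?_, hPR, ?_, ?_, ?_⟩
          · intro s hs
            obtain ⟨hs0, hs1, hs2, hs3, hs4⟩ := hST s hs
            refine ⟨hs0, by omega, hs2, by omega, ?_⟩
            intro p hp hpk1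
            by_cases hpk : p < k
            · exact hs4 p hp hpk
            · have hpe : p = k := by omega
              subst hpe
              have := pvCntGT_nonneg st s
              omega
          · intro q hq
            by_cases hqk : q ≤ k
            · have := hI6 q hqk; omega
            · have hqe : q = k + 1 := by omega
              subst hqe
              have := pvCntGE_nonneg st ((k + 1 : Nat) : Int)
              omega
          · intro p hp hchar
            by_cases hpk : p < k
            · exact hCov1 p hpk hchar
            · have hpe : p = k := by omega
              subst hpe
              rw [hck] at hchar
              exact absurd hchar hc1
          · intro p hp hchar
            by_cases hpk : p < k
            · exact hCov2 p hpk hchar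
            · have hpe : p = k := by omega
              subst hpe
              rw [hck] at hchar
              exact absurd hchar hc2

-- membership description of pvIdxs
theorem pvIdxs_mem_iff (prs : List (Int × Int)) (x : Int) :
    x ∈ pvIdxs prs ↔ ∃ pq ∈ prs, x = pq.1 ∨ x = pq.2 := by
  simp [pvIdxs, List.mem_flatMap, eq_comm]

-- THE bridge: B's per-position depth scan computes exactly A's pairings-dict lookup
theorem pvMatch_eq (l : List Char) (prs : List (Int × Int)) (st : List Int)
    (hinv : pvInvScan l l.length prs st)
    (hnd : (st ++ pvIdxs prs).Nodup)
    (x : Int) (hx0 : 0 ≤ x) (hxn : x < (l.length : Int)) :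
    pvMatch l x = pvLookup2 prs x := by
  obtain ⟨hPW, hST, hPR, hI6, hCov1, hCov2⟩ := hinv
  have hndI : (pvIdxs prs).Nodup := ((List.nodup_append.mp hnd).2).1
  have hD : List.Disjoint st (pvIdxs prs) := List.disjoint_of_nodup_append hnd
  have hxl : x.toNat < l.length := by omega
  have hxe : ((x.toNat : Nat) : Int) = x := by omega
  have hget : l.getD x.toNat ' ' = l[x.toNat] := by
    rw [List.getD_eq_getElem?_getD, List.getElem?_eq_getElem hxl]; rfl
  have hFx := pvF_succ l x.toNat
  rw [pvMatch]
  by_cases h1 : l[x.toNat] = '('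
  · rw [hget, if_pos h1]
    rcases hCov1 x.toNat hxl (by rw [hget, h1]) with hmem | ⟨b, hb⟩
    · -- unmatched '(' : both sides none
      have hmem' : x ∈ st := by rwa [hxe] at hmem
      have hs4 : ∀ p : Nat, x.toNat + 1 ≤ p → p < l.length →
          1 + pvF l (p + 1) - pvF l (x.toNat + 1) > 0 := (hST x hmem').2.2.2.2
      rw [pvScanF_none_of l l.length (x.toNat + 1) 1 (by omega) le_rfl hs4]
      rw [pvLookup2_eq_none prs x (fun hxi => hD hmem' hxi)]
    · -- matched '(' : both sides some b
      have hb' : (x, b) ∈ prs := by rwa [hxe] at hb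
      have hg := hPR (x, b) hb'
      have hg1 : x < b := hg.2.1
      have hg2 : b < (l.length : Int) := hg.2.2.1
      have hg5 : pvF l (b.toNat + 1) - pvF l (x.toNat + 1) = -1 := hg.2.2.2.2.2.1
      have hg6 : ∀ p : Nat, x.toNat + 1 ≤ p → p < b.toNat →
          1 + pvF l (p + 1) - pvF l (x.toNat + 1) > 0 := hg.2.2.2.2.2.2
      have hbe : ((b.toNat : Nat) : Int) = b := by omega
      rw [pvScanF_some_of l l.length (x.toNat + 1) 1 b.toNat (by omega) le_rfl
        (by omega) (by omega) (by omega) hg6]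
      rw [hbe, (pvLookup2_of_mem prs x b hndI hb').1]
  · by_cases h2 : l[x.toNat] = ')'
    · rw [hget, if_neg h1, if_pos h2]
      have hFx' : pvF l (x.toNat + 1) = pvF l x.toNat - 1 := by
        rw [hget, h2] at hFx; simp [pvDelta] at hFx; omega
      rcases hCov2 x.toNat hxl (by rw [hget, h2]) with ⟨a, ha⟩ | hrec
      · -- matched ')' : both sides some a
        have ha' : (a, x) ∈ prs := by rwa [hxe] at ha
        have hg := hPR (a, x) ha'
        have hg0 : 0 ≤ a := hg.1
        have hg1 : a < x := hg.2.1
        have hg3 : l.getD a.toNat ' ' = '(' := hg.2.2.2.1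
        have hg5 : pvF l (x.toNat + 1) - pvF l (a.toNat + 1) = -1 := hg.2.2.2.2.2.1
        have hg6 : ∀ p : Nat, a.toNat + 1 ≤ p → p < x.toNat →
            1 + pvF l (p + 1) - pvF l (a.toNat + 1) > 0 := hg.2.2.2.2.2.2
        have hae : ((a.toNat : Nat) : Int) = a := by omega
        have hFa : pvF l (a.toNat + 1) = pvF l a.toNat + 1 := by
          have hsa := pvF_succ l a.toNat
          rw [hg3] at hsa; simp [pvDelta] at hsa; omega
        have hpos : ∀ p : Nat, a.toNat < p → p < x.toNat →
            1 + pvF l p - pvF l x.toNat > 0 := by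
          intro p hap hpx
          by_cases hpe : p = a.toNat + 1
          · subst hpe; omega
          · have hgp := hg6 (p - 1) (by omega) (by omega)
            have hpp : p - 1 + 1 = p := by omega
            rw [hpp] at hgp
            omega
        rw [pvScanB_some_of l x.toNat 1 a.toNat le_rfl (by omega) (by omega) hpos]
        rw [hae, (pvLookup2_of_mem prs a x hndI ha').2]
      · -- unmatched ')' : both sides none
        rw [pvScanB_none_of l x.toNat 1 le_rfl
          (fun p hp => by have := hrec p (by omega); omega)]
        have hnotin : x ∉ pvIdxs prs := by
          intro hxi
          rcases (pvIdxs_mem_iff prs x).mp hxi with ⟨pq, hpq, hor⟩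
          have hg := hPR pq hpq
          rcases hor with he | he
          · have hg3 : l.getD pq.1.toNat ' ' = '(' := hg.2.2.2.1
            rw [← he, hget, h2] at hg3
            cases hg3
          · have hg0 : 0 ≤ pq.1 := hg.1
            have hg1 : pq.1 < pq.2 := hg.2.1
            have hg3 : l.getD pq.1.toNat ' ' = '(' := hg.2.2.2.1
            have hg5 : pvF l (pq.2.toNat + 1) - pvF l (pq.1.toNat + 1) = -1 := hg.2.2.2.2.2.1
            have hFa : pvF l (pq.1.toNat + 1) = pvF l pq.1.toNat + 1 := by
              have hsa := pvF_succ l pq.1.toNat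
              rw [hg3] at hsa; simp [pvDelta] at hsa; omega
            have hxq : pq.2.toNat = x.toNat := by omega
            rw [hxq] at hg5
            have hr := hrec pq.1.toNat (by omega)
            omega
        rw [pvLookup2_eq_none prs x hnotin]
    · -- not a paren: both sides none
      rw [hget, if_neg h1, if_neg h2]
      have hnotin : x ∉ pvIdxs prs := by
        intro hxi
        rcases (pvIdxs_mem_iff prs x).mp hxi with ⟨pq, hpq, hor⟩
        have hg := hPR pq hpq
        rcases hor with he | he
        · have hg3 : l.getD pq.1.toNat ' ' = '(' := hg.2.2.2.1
          rw [← he, hget] at hg3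
          exact h1 hg3
        · have hg4 : l.getD pq.2.toNat ' ' = ')' := hg.2.2.2.2.1
          rw [← he, hget] at hg4
          exact h2 hg4
      rw [pvLookup2_eq_none prs x hnotin]

-- the two extension loops agree step for step
theorem pvExt_eq (d : PySem.Dict Int Int) (l : List Char)
    (hlm : ∀ x : Int, 0 ≤ x → x < (l.length : Int) → d.get? x = pvMatch l x) :
    ∀ (fuel : Nat) (i j : Int) (acc : List Char), (i + 1).toNat ≤ fuel → i < (l.length : Int) →
    pvAExt d (l.length : Int) i j acc = pvBExtL l (l.length : Int) i j acc := by
  intro fuel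
  induction fuel with
  | zero =>
      intro i j acc hfe _
      rw [pvAExt, dif_neg (by omega), pvBExtL, dif_neg (by omega)]
  | succ f ih =>
      intro i j acc hfe hi
      by_cases hg : 0 ≤ i ∧ j < (l.length : Int)
      · have hmx := hlm i hg.1 hi
        by_cases hm : pvMatch l i = some j
        · rw [pvAExt, dif_pos hg, if_pos (by rw [hmx, hm]),
            pvBExtL, dif_pos ⟨hg.1, hg.2, hm⟩]
          exact ih (i - 1) (j + 1) _ (by omega) (by omega)
        · rw [pvAExt, dif_pos hg, if_neg (by rw [hmx]; exact hm),
            pvBExtL, dif_neg (by rintro ⟨-, -, h⟩; exact hm h)]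
      · rw [pvAExt, dif_neg hg, pvBExtL, dif_neg (by rintro ⟨h1, h2, -⟩; exact hg ⟨h1, h2⟩)]

-- ===== VERDICT (by name: the statement is the Claim_ definition above) =====
theorem replace_parentheses_with_dots_spec : Claim_equal_replace_parentheses_with_dots := by
  intro s start end_ _hdom hpre
  obtain ⟨hp1, hp2, hp3⟩ := hpre
  unfold Spec_replace_parentheses_with_dots
  unfold replace_parentheses_with_dots replace_parentheses_with_dots_alt
  have hguard : ¬ (start ≥ end_ ∨ start < 0 ∨ end_ ≥ (s.toList.length : Int)) := by
    rintro (h | h | h) <;> omega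
  simp only [if_neg hguard]
  set l := s.toList with hldef
  -- the pairing pass and its two invariants
  have hinv0 : pvInv 0 [] [] PySem.Dict.empty := by
    refine ⟨le_refl 0, by simp, by simp, by simp [pvIdxs], fun x => ?_⟩
    simp [PySem.Dict.get?_empty, pvLookup2]
  have hfold := pvFold_inv l 0 [] [] PySem.Dict.empty hinv0
  set d := ((PySem.List.enumerate l).foldl pvStepA ([], PySem.Dict.empty)).2 with hddef
  set prs := ((PySem.List.enumerate l).foldl pvStepB ([], [])).1 with hprsdef
  set stf := ((PySem.List.enumerate l).foldl pvStepB ([], [])).2 with hstfdef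
  have hinvA := hfold.2
  rw [zero_add] at hinvA
  obtain ⟨-, -, -, hnd, hlk⟩ := hinvA
  have hscan0 : pvInvScan l 0 [] [] := by
    refine ⟨List.Pairwise.nil, by simp, by simp, ?_, by simp, by simp⟩
    intro q hq
    interval_cases q
    simp [pvCntGE]
  have hscan := pvScanFold l l 0 [] [] (by simp) hscan0
  simp only [Nat.cast_zero, Nat.zero_add, zero_add] at hscan
  have hmeq : ∀ x : Int, 0 ≤ x → x < (l.length : Int) → d.get? x = pvMatch l x := by
    intro x h0 h1
    rw [hlk]
    exact (pvMatch_eq l prs stf hscan hnd x h0 h1).symm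
  -- region loops agree elementwise
  have hreg : (PySem.List.pyRange start (end_ + 1) 1).foldl (fun acc i =>
      match d.get? i with
      | some m => PySem.List.pySetD (PySem.List.pySetD acc i '.') m '.'
      | none => acc) l = (PySem.List.pyRange start (end_ + 1) 1).foldl (fun acc i =>
      match pvMatch l i with
      | some j => PySem.List.pySetD (PySem.List.pySetD acc i '.') j '.'
      | none => acc) l := by
    apply PySem.List.foldl_congr_mem
    intro acc i hi
    rw [PySem.List.mem_pyRange_one] at hi
    rw [hmeq i (by omega) (by omega)]
  rw [hreg]
  rw [pvExt_eq d l hmeq (start.toNat + 1) (start - 1) (end_ + 1) _ (by omega) (by omega)]
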